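-- pv_equiv track=rewrite | github.com/WitheredGryphon/witheredgryphon.github.io | python/Code Wars/inertial_array.py | is_inertial
-- ===== SOURCE A (Python) =====
-- def is_inertial(numList):
--     if len(numList) < 2: return False
--     if not any(x for x in numList if x%2 != 0): return False
--     if max(numList) % 2 != 0: return False
--     odds = [x for x in numList if x%2 != 0]
--     evens = [x for x in numList if x%2 == 0]
--     evens.remove(max(evens))
--     if evens and min(odds) < max(evens): return False
--     return True
-- ===== SOURCE B (Python) =====
-- def is_inertial(numList):
--     if len(numList) < 2:
--         return False
--     min_odd = max_odd = None       # running min/max of the odd values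
--     max_even = second_even = None  # largest even, and largest even strictly below it
--     max_even_count = 0             # multiplicity of max_even among the evens
--     for x in numList:
--         if x % 2:
--             if min_odd is None:
--                 min_odd = max_odd = x
--             else:
--                 if x < min_odd:
--                     min_odd = x
--                 if x > max_odd:
--                     max_odd = x
--         else:
--             if max_even is None or x > max_even:
--                 second_even = max_even
--                 max_even = x
--                 max_even_count = 1
--             elif x == max_even:
--                 max_even_count += 1
--             elif second_even is None or x > second_even:
--                 second_even = x
--     if min_odd is None:
--         return False
--     if max_even is None or max_odd > max_even:
--         return False  # global maximum is odd
--     remaining = max_even if max_even_count >= 2 else second_even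
--     return remaining is None or min_odd >= remaining
-- ===== Notes on version B (the rewrite author's own statement) =====
-- stated objective: alternative
-- what changed: Replaces A's odds/evens list comprehensions, repeated max()/min() scans and the evens.remove(max(evens)) mutation by a single pass that maintains running summaries (min/max odd, largest even with its multiplicity, and the second-largest even).
import Mathlib
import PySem

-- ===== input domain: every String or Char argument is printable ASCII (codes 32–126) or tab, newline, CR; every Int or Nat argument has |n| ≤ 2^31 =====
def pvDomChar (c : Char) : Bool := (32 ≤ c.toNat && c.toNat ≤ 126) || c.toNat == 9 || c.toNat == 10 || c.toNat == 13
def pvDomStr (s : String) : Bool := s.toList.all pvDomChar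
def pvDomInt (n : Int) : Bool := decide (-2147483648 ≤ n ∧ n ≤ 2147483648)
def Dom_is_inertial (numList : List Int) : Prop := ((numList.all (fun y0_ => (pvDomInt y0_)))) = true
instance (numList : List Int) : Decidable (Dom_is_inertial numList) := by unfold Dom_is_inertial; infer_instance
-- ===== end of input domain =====

-- B replaces A's list comprehensions, max/min calls and the remove() mutation by a single
-- pass maintaining running summaries (min/max odd, max even with multiplicity, second-largest even);
-- objective: alternative (one pass, no intermediate lists).

-- ===== PORT A =====
-- literal transliteration of A; the `.getD` defaults are only reached on inputs where the
-- corresponding guard already made the list nonempty, so they never affect the value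
def is_inertial (numList : List Int) : Bool :=
  if numList.length < 2 then false
  else if !((numList.filter (fun x => x % 2 != 0)).any (fun x => x != 0)) then false
  else if ((PySem.List.max? numList (fun y => y)).getD 0) % 2 != 0 then false
  else
    let odds := numList.filter (fun x => x % 2 != 0)
    let evens := numList.filter (fun x => x % 2 == 0)
    let evens2 := (PySem.List.remove? evens ((PySem.List.max? evens (fun y => y)).getD 0)).getD []
    if !evens2.isEmpty && decide (((PySem.List.min? odds (fun y => y)).getD 0) < ((PySem.List.max? evens2 (fun y => y)).getD 0)) then false
    else true

-- ===== PORT B =====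
-- running state of Source B's single loop
structure InState where
  minOdd : Option Int
  maxOdd : Option Int
  maxEven : Option Int
  sndEven : Option Int
  cnt : Int
deriving Repr, DecidableEq

def inStep (s : InState) (x : Int) : InState :=
  if x % 2 != 0 then
    match s.minOdd, s.maxOdd with
    | some mn, some mx =>
        { s with minOdd := some (if x < mn then x else mn),
                 maxOdd := some (if x > mx then x else mx) }
    | _, _ => { s with minOdd := some x, maxOdd := some x }
  else
    match s.maxEven with
    | none => { s with sndEven := s.maxEven, maxEven := some x, cnt := 1 }
    | some me =>
        if x > me then { s with sndEven := s.maxEven, maxEven := some x, cnt := 1 }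
        else if x = me then { s with cnt := s.cnt + 1 }
        else
          match s.sndEven with
          | none => { s with sndEven := some x }
          | some se => if x > se then { s with sndEven := some x } else s

def is_inertial_alt (numList : List Int) : Bool :=
  if numList.length < 2 then false
  else
    let s := numList.foldl inStep ⟨none, none, none, none, 0⟩
    match s.minOdd, s.maxOdd with
    | some mn, some mx =>
      match s.maxEven with
      | none => false
      | some me =>
        if mx > me then false
        else
          match (if s.cnt ≥ 2 then some me else s.sndEven) with
          | none => true
          | some r => decide (mn ≥ r)
    | _, _ => false

-- ===== PRECONDITION & SPEC =====
def Spec_is_inertial (numList : List Int) (out : Bool) : Prop := out = is_inertial_alt numList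
instance (numList : List Int) (out : Bool) : Decidable (Spec_is_inertial numList out) := by unfold Spec_is_inertial; infer_instance

-- ===== CLAIM (what is proved, stated in full; the proofs are below) =====
def Claim_equal_is_inertial : Prop := ∀ (numList : List Int), Dom_is_inertial numList → Spec_is_inertial numList (is_inertial numList)

-- ===== LEMMAS AND PROOFS =====

-- the intended value of the loop state after the whole list
def specState (xs : List Int) : InState :=
  let O := xs.filter (fun x => x % 2 != 0)
  let E := xs.filter (fun x => x % 2 == 0)
  { minOdd := O.min?, maxOdd := O.max?, maxEven := E.max?,
    sndEven := match E.max? with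
               | none => none
               | some m => (E.filter (fun y => decide (y < m))).max?,
    cnt := match E.max? with
           | none => 0
           | some m => (E.count m : Int) }

theorem max?_append_singleton (l : List Int) (x : Int) :
    (l ++ [x]).max? = some (match l.max? with | none => x | some m => max m x) := by
  cases l with
  | nil => rfl
  | cons a t => simp [List.max?, List.foldl_append]

theorem min?_append_singleton (l : List Int) (x : Int) :
    (l ++ [x]).min? = some (match l.min? with | none => x | some m => min m x) := by
  cases l with
  | nil => rfl
  | cons a t => simp [List.min?, List.foldl_append]

theorem max?_perm {l l' : List Int} (h : l.Perm l') : l.max? = l'.max? := by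
  cases hm : l.max? with
  | none =>
    rw [List.max?_eq_none_iff] at hm; subst hm
    simp [h.symm.eq_nil]
  | some m =>
    rw [List.max?_eq_some_iff] at hm
    symm; rw [List.max?_eq_some_iff]
    exact ⟨h.mem_iff.mp hm.1, fun b hb => hm.2 b (h.mem_iff.mpr hb)⟩

theorem inStep_spec (xs : List Int) (x : Int) :
    inStep (specState xs) x = specState (xs ++ [x]) := by
  by_cases hpar : x % 2 = 0
  · -- even element: the odd summaries are unchanged, the even ones are updated
    have hO : (xs ++ [x]).filter (fun y => y % 2 != 0) = xs.filter (fun y => y % 2 != 0) := by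
      simp [List.filter_append, hpar]
    have hE : (xs ++ [x]).filter (fun y => y % 2 == 0)
        = xs.filter (fun y => y % 2 == 0) ++ [x] := by
      simp [List.filter_append, hpar]
    cases hme : (xs.filter (fun y => y % 2 == 0)).max? with
    | none =>
      have hEnil : xs.filter (fun y => y % 2 == 0) = [] := List.max?_eq_none_iff.mp hme
      unfold inStep specState
      simp [hO, hE, hpar, hEnil, List.max?]
    | some me =>
      have hchar := List.max?_eq_some_iff.mp hme
      by_cases hgt : x > me
      · have h1 : (xs.filter (fun y => y % 2 == 0) ++ [x]).max? = some x := by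
          rw [max?_append_singleton, hme]; simp [max_eq_right (le_of_lt hgt)]
        have h2 : (xs.filter (fun y => y % 2 == 0) ++ [x]).filter (fun y => decide (y < x))
            = xs.filter (fun y => y % 2 == 0) := by
          rw [List.filter_append]
          have he : (xs.filter (fun y => y % 2 == 0)).filter (fun y => decide (y < x))
              = xs.filter (fun y => y % 2 == 0) := by
            apply List.filter_eq_self.mpr
            intro a ha; simpa using lt_of_le_of_lt (hchar.2 a ha) hgt
          simp [he]
        have h3 : (xs.filter (fun y => y % 2 == 0) ++ [x]).count x = 1 := by
          rw [List.count_append]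
          have hz : (xs.filter (fun y => y % 2 == 0)).count x = 0 := by
            apply List.count_eq_zero.mpr
            intro hmem
            exact absurd (hchar.2 x hmem) (not_le.mpr hgt)
          simp [hz]
        unfold inStep specState
        simp only [hO, hE]
        generalize hEE : List.filter (fun y => y % 2 == 0) xs = E at hme h1 h2 h3 ⊢
        simp [hme, hpar, hgt, h1, h2, h3]
      · by_cases heq : x = me
        · subst heq
          have h1 : (xs.filter (fun y => y % 2 == 0) ++ [x]).max? = some x := by
            rw [max?_append_singleton, hme]; simp
          have h2 : (xs.filter (fun y => y % 2 == 0) ++ [x]).filter (fun y => decide (y < x))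
              = (xs.filter (fun y => y % 2 == 0)).filter (fun y => decide (y < x)) := by
            simp [List.filter_append]
          have h3 : (xs.filter (fun y => y % 2 == 0) ++ [x]).count x
              = (xs.filter (fun y => y % 2 == 0)).count x + 1 := by
            simp [List.count_append]
          unfold inStep specState
          simp only [hO, hE]
          generalize hEE : List.filter (fun y => y % 2 == 0) xs = E at hme h1 h2 h3 ⊢
          simp [hme, hpar, h1, h2, h3]
        · have hlt : x < me := lt_of_le_of_ne (not_lt.mp hgt) heq
          have h1 : (xs.filter (fun y => y % 2 == 0) ++ [x]).max? = some me := by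
            rw [max?_append_singleton, hme]; simp [max_eq_left (le_of_lt hlt)]
          have h2 : (xs.filter (fun y => y % 2 == 0) ++ [x]).filter (fun y => decide (y < me))
              = (xs.filter (fun y => y % 2 == 0)).filter (fun y => decide (y < me)) ++ [x] := by
            simp [List.filter_append, hlt]
          have h3 : (xs.filter (fun y => y % 2 == 0) ++ [x]).count me
              = (xs.filter (fun y => y % 2 == 0)).count me := by
            simp [List.count_append, heq]
          cases hsnd : ((xs.filter (fun y => y % 2 == 0)).filter
              (fun y => decide (y < me))).max? with
          | none =>
            have h4 : ((xs.filter (fun y => y % 2 == 0) ++ [x]).filter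
                (fun y => decide (y < me))).max? = some x := by
              rw [h2, max?_append_singleton, hsnd]
            unfold inStep specState
            simp only [hO, hE]
            generalize hEE : List.filter (fun y => y % 2 == 0) xs = E at hme h1 h3 h4 hsnd ⊢
            simp [hme, hpar, hgt, heq, hsnd, h1, h3]
            rw [← List.filter_append, h4]
          | some se =>
            have h4 : ((xs.filter (fun y => y % 2 == 0) ++ [x]).filter
                (fun y => decide (y < me))).max? = some (max se x) := by
              rw [h2, max?_append_singleton, hsnd]
            have h5 : (if x > se then some x else some se) = some (max se x) := by
              split_ifs with h
              · rw [max_eq_right (le_of_lt h)]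
              · rw [max_eq_left (not_lt.mp h)]
            unfold inStep specState
            simp only [hO, hE]
            generalize hEE : List.filter (fun y => y % 2 == 0) xs = E at hme h1 h3 h4 hsnd ⊢
            simp only [hme, h1, h3, h4, hsnd]
            simp [hpar, hgt, heq]
            split_ifs with h
            · simp [max_eq_right (le_of_lt h)]
            · simp [max_eq_left (not_lt.mp h)]
  · -- odd element: the even summaries are unchanged, min/max odd are updated
    have hO : (xs ++ [x]).filter (fun y => y % 2 != 0)
        = xs.filter (fun y => y % 2 != 0) ++ [x] := by
      simp [List.filter_append, hpar]
    have hE : (xs ++ [x]).filter (fun y => y % 2 == 0) = xs.filter (fun y => y % 2 == 0) := by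
      simp [List.filter_append, hpar]
    cases hmn : (xs.filter (fun y => y % 2 != 0)).min? with
    | none =>
      have hOnil : xs.filter (fun y => y % 2 != 0) = [] := List.min?_eq_none_iff.mp hmn
      unfold inStep specState
      simp [hO, hE, hpar, hOnil, List.min?, List.max?]
    | some mn =>
      have hne : xs.filter (fun y => y % 2 != 0) ≠ [] := by
        intro h; rw [h] at hmn; simp [List.min?] at hmn
      obtain ⟨mx, hmx⟩ : ∃ mx, (xs.filter (fun y => y % 2 != 0)).max? = some mx := by
        cases hx : (xs.filter (fun y => y % 2 != 0)).max? with
        | none => exact absurd (List.max?_eq_none_iff.mp hx) hne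
        | some m => exact ⟨m, rfl⟩
      have h1 : (xs.filter (fun y => y % 2 != 0) ++ [x]).min? = some (min mn x) := by
        rw [min?_append_singleton, hmn]
      have h2 : (xs.filter (fun y => y % 2 != 0) ++ [x]).max? = some (max mx x) := by
        rw [max?_append_singleton, hmx]
      have h3 : (if x < mn then x else mn) = min mn x := by split_ifs <;> omega
      have h4 : (if x > mx then x else mx) = max mx x := by split_ifs <;> omega
      unfold inStep specState
      simp only [hO, hE]
      generalize hOO : List.filter (fun y => y % 2 != 0) xs = O at hmn hmx h1 h2 ⊢
      simp [hmn, hmx, hpar, h1, h2, h3, h4]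

theorem foldl_spec (xs : List Int) :
    xs.foldl inStep ⟨none, none, none, none, 0⟩ = specState xs := by
  induction xs using List.reverseRecOn with
  | nil => rfl
  | append_singleton t x ih => rw [List.foldl_append, List.foldl_cons, List.foldl_nil, ih, inStep_spec]

theorem pymax_id (l : List Int) : PySem.List.max? l (fun y => y) = l.max? := by
  cases l with
  | nil => rfl
  | cons a t => rw [PySem.List.max?_id_cons]; rfl

theorem pymin_id (l : List Int) : PySem.List.min? l (fun y => y) = l.min? := by
  cases l with
  | nil => rfl
  | cons a t => rw [PySem.List.min?_id_cons]; rfl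

-- after erasing one occurrence of the maximum, the new maximum is the old one (if it had
-- multiplicity ≥ 2) or else the largest element strictly below it
theorem erase_max? (E : List Int) (me : Int) (h : E.max? = some me) :
    (E.erase me).max? =
      (if 2 ≤ E.count me then some me else (E.filter (fun y => decide (y < me))).max?) := by
  have hchar := List.max?_eq_some_iff.mp h
  split_ifs with hc
  · rw [List.max?_eq_some_iff]
    constructor
    · apply List.count_pos_iff.mp
      rw [List.count_erase_self]
      omega
    · intro b hb; exact hchar.2 b (List.mem_of_mem_erase hb)
  · have hc1 : E.count me = 1 := by
      have := List.count_pos_iff.mpr hchar.1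
      omega
    apply max?_perm
    rw [List.perm_iff_count]
    intro a
    by_cases ha : a = me
    · subst ha
      rw [List.count_erase_self, hc1]
      symm
      apply List.count_eq_zero.mpr
      intro hmem2
      have := List.mem_filter.mp hmem2
      simp at this
    · rw [List.count_erase_of_ne ha]
      by_cases hin : a ∈ E
      · rw [List.count_filter (by simpa using lt_of_le_of_ne (hchar.2 a hin) ha)]
      · rw [List.count_eq_zero.mpr hin,
            List.count_eq_zero.mpr (fun hm => hin (List.mem_filter.mp hm).1)]

theorem odd_mem_filter {a : Int} {xs : List Int}
    (ha : a ∈ xs.filter (fun y => y % 2 != 0)) : a % 2 ≠ 0 := by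
  have := (List.mem_filter.mp ha).2
  simpa using this

theorem even_mem_filter {a : Int} {xs : List Int}
    (ha : a ∈ xs.filter (fun y => y % 2 == 0)) : a % 2 = 0 := by
  have := (List.mem_filter.mp ha).2
  simpa using this

theorem is_inertial_eq (xs : List Int) : is_inertial xs = is_inertial_alt xs := by
  unfold is_inertial is_inertial_alt
  rw [foldl_spec]
  by_cases hlen : xs.length < 2
  · simp [hlen]
  · simp only [if_neg hlen]
    have hxs : xs ≠ [] := by
      intro h; subst h; simp at hlen
    unfold specState
    cases hmn : (xs.filter (fun y => y % 2 != 0)).min? with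
    | none =>
      have hOnil : xs.filter (fun y => y % 2 != 0) = [] := List.min?_eq_none_iff.mp hmn
      simp [hOnil]
    | some mn =>
      have hmnc := List.min?_eq_some_iff.mp hmn
      have hne : xs.filter (fun y => y % 2 != 0) ≠ [] := by
        intro h; rw [h] at hmn; simp [List.min?] at hmn
      obtain ⟨mx, hmx⟩ : ∃ mx, (xs.filter (fun y => y % 2 != 0)).max? = some mx := by
        cases hx : (xs.filter (fun y => y % 2 != 0)).max? with
        | none => exact absurd (List.max?_eq_none_iff.mp hx) hne
        | some m => exact ⟨m, rfl⟩
      have hmxc := List.max?_eq_some_iff.mp hmx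
      have hany : (xs.filter (fun y => y % 2 != 0)).any (fun y => y != 0) = true := by
        rw [List.any_eq_true]
        refine ⟨mn, hmnc.1, ?_⟩
        have := odd_mem_filter hmnc.1
        simp; omega
      have hpmn : PySem.List.min? (xs.filter (fun y => y % 2 != 0)) (fun y => y) = some mn := by
        rw [pymin_id, hmn]
      obtain ⟨M, hM⟩ : ∃ M, PySem.List.max? xs (fun y => y) = some M := by
        cases hx : PySem.List.max? xs (fun y => y) with
        | none => rw [pymax_id, List.max?_eq_none_iff] at hx; exact absurd hx hxs
        | some m => exact ⟨m, rfl⟩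
      have hMc := List.max?_eq_some_iff.mp (pymax_id xs ▸ hM)
      cases hme : (xs.filter (fun y => y % 2 == 0)).max? with
      | none =>
        -- no even element at all: the global max is odd, both sides give false
        have hEnil : xs.filter (fun y => y % 2 == 0) = [] := List.max?_eq_none_iff.mp hme
        have hModd : M % 2 ≠ 0 := by
          apply odd_mem_filter (xs := xs)
          rw [List.mem_filter]
          refine ⟨hMc.1, ?_⟩
          by_contra hcon
          have : M ∈ xs.filter (fun y => y % 2 == 0) := by
            rw [List.mem_filter]
            refine ⟨hMc.1, by simpa using hcon⟩
          rw [hEnil] at this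
          simp at this
        simp [hany, hM, hme, hModd, hmn, hmx]
      | some me =>
        have hmec := List.max?_eq_some_iff.mp hme
        have hmeEven : me % 2 = 0 := even_mem_filter hmec.1
        have hmxOdd : mx % 2 ≠ 0 := odd_mem_filter hmxc.1
        have hMeq : M = max mx me := by
          have h1 : M ≤ max mx me := by
            rcases (List.mem_filter.mp (List.mem_filter.mpr
              ⟨hMc.1, by simp⟩ : M ∈ xs.filter (fun _ => true))).1 with _
            by_cases hp : M % 2 = 0
            · have : M ∈ xs.filter (fun y => y % 2 == 0) := by
                rw [List.mem_filter]; exact ⟨hMc.1, by simpa using hp⟩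
              exact le_trans (hmec.2 M this) (le_max_right _ _)
            · have : M ∈ xs.filter (fun y => y % 2 != 0) := by
                rw [List.mem_filter]; refine ⟨hMc.1, by simpa using hp⟩
              exact le_trans (hmxc.2 M this) (le_max_left _ _)
          have h2 : max mx me ≤ M := by
            apply max_le
            · exact hMc.2 mx ((List.mem_filter.mp hmxc.1).1)
            · exact hMc.2 me ((List.mem_filter.mp hmec.1).1)
          omega
        by_cases hgt : mx > me
        · -- global max is the largest odd: both sides false
          have hMz : M = mx := by rw [hMeq]; omega
          have hModd : M % 2 ≠ 0 := by rw [hMz]; exact hmxOdd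
          simp [hany, hM, hme, hModd, hmn, hmx, hgt]
        · have hlt : mx < me := by
            have : mx ≠ me := by intro h; rw [h] at hmxOdd; exact hmxOdd hmeEven
            omega
          have hMz : M = me := by rw [hMeq]; omega
          have hMev : ¬ (M % 2 ≠ 0) := by rw [hMz]; omega
          have hpm : PySem.List.max? (xs.filter (fun y => y % 2 == 0)) (fun y => y)
              = some me := by rw [pymax_id, hme]
          have hrem : PySem.List.remove? (xs.filter (fun y => y % 2 == 0)) me
              = some ((xs.filter (fun y => y % 2 == 0)).erase me) :=
            PySem.List.remove?_eq_some_erase _ me hmec.1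
          have hcast : ((2:Int) ≤ ((xs.filter (fun y => y % 2 == 0)).count me : Int))
              ↔ 2 ≤ (xs.filter (fun y => y % 2 == 0)).count me := by
            exact_mod_cast Iff.rfl
          have hkey := erase_max? (xs.filter (fun y => y % 2 == 0)) me hme
          simp only [List.filter_filter] at hkey
          cases hR : ((xs.filter (fun y => y % 2 == 0)).erase me).max? with
          | none =>
            have hEr : (xs.filter (fun y => y % 2 == 0)).erase me = [] :=
              List.max?_eq_none_iff.mp hR
            rw [hR] at hkey
            by_cases hcnt : 2 ≤ (xs.filter (fun y => y % 2 == 0)).count me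
            · rw [if_pos hcnt] at hkey; simp at hkey
            · rw [if_neg hcnt] at hkey
              simp [hany, hM, hme, hmn, hmx, hpm, hrem, hMev, hEr, hgt, hcnt, ← hkey]
          | some r =>
            have hEr : ¬ ((xs.filter (fun y => y % 2 == 0)).erase me).isEmpty = true := by
              have hmem : r ∈ (xs.filter (fun y => y % 2 == 0)).erase me :=
                (List.max?_eq_some_iff.mp hR).1
              simp only [List.isEmpty_iff]
              intro h; rw [h] at hmem; simp at hmem
            rw [hR] at hkey
            have hpmr : PySem.List.max? ((xs.filter (fun y => y % 2 == 0)).erase me)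
                (fun y => y) = some r := by rw [pymax_id, hR]
            by_cases hcnt : 2 ≤ (xs.filter (fun y => y % 2 == 0)).count me
            · rw [if_pos hcnt] at hkey
              have hrme : r = me := by simpa using hkey
              subst hrme
              simp [hany, hM, hme, hmn, hmx, hpm, hrem, hMev, hpmr, hEr, hgt, hcnt, hpmn]
              by_cases hmr : mn < r <;> simp [hmr] <;> omega
            · rw [if_neg hcnt] at hkey
              simp [hany, hM, hme, hmn, hmx, hpm, hrem, hMev, hpmr, hEr, hgt, hcnt, hpmn, ← hkey]
              by_cases hmr : mn < r <;> simp [hmr] <;> omega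

-- ===== VERDICT (by name: the statement is the Claim_ definition above) =====
theorem is_inertial_spec : Claim_equal_is_inertial := by
  intro xs _
  unfold Spec_is_inertial
  exact is_inertial_eq xs
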